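-- pv_equiv track=rewrite | github.com/MrBrantCode/unitest_baseline | mut_generate/mist_train_cf/cf_89930/solution.py | sum_prime_fibonacci
-- ===== SOURCE A (Python) =====
-- def sum_prime_fibonacci(numbers):
--     def is_prime(n):
--         if n <= 1:
--             return False
--         if n == 2:
--             return True
--         if n % 2 == 0:
--             return False
--         i = 3
--         while i * i <= n:
--             if n % i == 0:
--                 return False
--             i += 2
--         return True
--
--     def is_fibonacci(n):
--         a, b = 0, 1
--         while a <= n:
--             if a == n:
--                 return True
--             a, b = b, a + b
--         return False
--
--     result = 0
--     for num in numbers: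
--         if num > 0 and (is_prime(num) or is_fibonacci(num)):
--             result += num
--     return result
-- ===== SOURCE B (Python) =====
-- def sum_prime_fibonacci(numbers):
--     def is_prime(n):
--         if n <= 1:
--             return False
--         if n == 2:
--             return True
--         if n % 2 == 0:
--             return False
--         i = 3
--         while i * i <= n:
--             if n % i == 0:
--                 return False
--             i += 2
--         return True
--
--     bound = max(numbers, default=0)
--     fib_set = set()
--     a, b = 0, 1
--     while a <= bound:
--         fib_set.add(a)
--         a, b = b, a + b
--     total = 0
--     for num in numbers:
--         if num > 0 and (is_prime(num) or num in fib_set):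
--             total += num
--     return total
-- ===== Notes on version B (the rewrite author's own statement) =====
-- stated objective: alternative
-- what changed: Instead of rerunning the iterative Fibonacci generator from scratch for every element, B computes bound = max of the list (default zero), generates all Fibonacci numbers up to that bound once into a set, and the per-element Fibonacci test becomes a set-membership lookup; the trial-division primality test is unchanged.
import Mathlib
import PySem

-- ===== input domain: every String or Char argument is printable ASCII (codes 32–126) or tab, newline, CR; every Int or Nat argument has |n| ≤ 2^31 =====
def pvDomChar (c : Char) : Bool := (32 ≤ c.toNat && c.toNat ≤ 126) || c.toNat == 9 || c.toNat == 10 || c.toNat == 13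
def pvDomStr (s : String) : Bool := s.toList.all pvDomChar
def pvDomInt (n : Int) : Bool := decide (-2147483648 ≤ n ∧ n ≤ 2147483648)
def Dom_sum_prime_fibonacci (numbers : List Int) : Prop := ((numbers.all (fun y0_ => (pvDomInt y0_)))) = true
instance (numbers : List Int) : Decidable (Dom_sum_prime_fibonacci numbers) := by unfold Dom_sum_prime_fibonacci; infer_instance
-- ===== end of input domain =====

-- B replaces A's per-element iterative Fibonacci scan by one Fibonacci table (a set) built
-- once up to max(numbers); same trial-division primality test; return values proved equal.

-- ===== PORT A =====
-- is_prime: trial division by odd i from 3 while i*i <= n (identical helper in both Pythons).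
-- The Nat fuel only makes the while-loop total; n.toNat iterations always suffice.
def pvIsPrimeAux (n i : Int) : Nat → Bool
  | 0 => true
  | f + 1 =>
    if i * i ≤ n then (if PySem.Int.mod n i == 0 then false else pvIsPrimeAux n (i + 2) f)
    else true

def pvIsPrime (n : Int) : Bool :=
  if n ≤ 1 then false
  else if n == 2 then true
  else if PySem.Int.mod n 2 == 0 then false
  else pvIsPrimeAux n 3 n.toNat

-- is_fibonacci: a,b = 0,1; while a <= n: hit or advance.  Fuel 2*n+2 always lets the loop
-- finish (proved below: the result is stable for any fuel ≥ 2*n+2).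
def pvIsFibAux (a b n : Int) : Nat → Bool
  | 0 => false
  | f + 1 =>
    if a ≤ n then (if a == n then true else pvIsFibAux b (a + b) n f) else false

def sum_prime_fibonacci (numbers : List Int) : Int :=
  numbers.foldl
    (fun result num =>
      if num > 0 && (pvIsPrime num || pvIsFibAux 0 1 num (2 * num.toNat + 2)) then result + num
      else result) 0

-- ===== PORT B =====
-- while a <= bound: fib_set.add(a); a, b = b, a + b   (same fuel-for-totality device)
def pvFibSetAux (a b bound : Int) : Nat → PySem.Set Int → PySem.Set Int
  | 0, s => s
  | f + 1, s => if a ≤ bound then pvFibSetAux b (a + b) bound f (PySem.Set.add s a) else s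

def sum_prime_fibonacci_alt (numbers : List Int) : Int :=
  let bound := PySem.List.maxD numbers (fun x => x) 0   -- max(numbers, default=0)
  let fibSet := pvFibSetAux 0 1 bound (2 * bound.toNat + 2) PySem.Set.empty
  numbers.foldl
    (fun total num =>
      if num > 0 && (pvIsPrime num || PySem.Set.contains fibSet num) then total + num
      else total) 0

-- ===== PRECONDITION & SPEC =====
def Spec_sum_prime_fibonacci (numbers : List Int) (out : Int) : Prop := out = sum_prime_fibonacci_alt numbers
instance (numbers : List Int) (out : Int) : Decidable (Spec_sum_prime_fibonacci numbers out) := by unfold Spec_sum_prime_fibonacci; infer_instance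

-- ===== CLAIM (what is proved, stated in full; the proofs are below) =====
def Claim_equal_sum_prime_fibonacci : Prop := ∀ (numbers : List Int), Dom_sum_prime_fibonacci numbers → Spec_sum_prime_fibonacci numbers (sum_prime_fibonacci numbers)

-- ===== LEMMAS AND PROOFS =====

-- Once the running Fibonacci value has passed n, the scan can only answer false.
theorem pvIsFibAux_false_of_lt (F : Nat) : ∀ (a b n : Int), n < a → pvIsFibAux a b n F = false := by
  induction F with
  | zero => intro a b n _; rfl
  | succ f _ =>
    intro a b n h
    simp [pvIsFibAux, Int.not_le.mpr h]

-- Fuel irrelevance: with fuel ≥ 2*n+2 the fib scan has already left the loop.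
theorem pvIsFibAux_fuel_stable (f : Nat) : ∀ (k : Nat) (a b n : Int),
    0 ≤ a → a ≤ b → 1 ≤ b → 2 * n + 2 ≤ a + b + (f : Int) →
    pvIsFibAux a b n (f + 1 + k) = pvIsFibAux a b n (f + 1) := by
  induction f with
  | zero =>
    intro k a b n ha hab hb hfuel
    have hk : 0 + 1 + k = k + 1 := by omega
    rw [hk]
    by_cases h : n < a
    · rw [pvIsFibAux_false_of_lt, pvIsFibAux_false_of_lt] <;> exact h
    · have hle : a ≤ n := by omega
      have hb' : n < b := by omega
      by_cases he : a = n
      · simp [pvIsFibAux, he]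
      · have hne : ¬ (a == n) = true := by simp [he]
        simp only [pvIsFibAux, if_pos hle, if_neg hne]
        rw [pvIsFibAux_false_of_lt _ _ _ _ hb']
  | succ f ih =>
    intro k a b n ha hab hb hfuel
    have h1 : (f + 1 + 1 + k) = (f + 1 + k) + 1 := by omega
    have h2 : (f + 1 + 1) = (f + 1) + 1 := by omega
    rw [h1, h2]
    by_cases h : n < a
    · rw [pvIsFibAux_false_of_lt, pvIsFibAux_false_of_lt] <;> exact h
    · have hle : a ≤ n := by omega
      by_cases he : a = n
      · simp [pvIsFibAux, he]
      · have hne : ¬ (a == n) = true := by simp [he]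
        simp only [pvIsFibAux, if_pos hle, if_neg hne]
        exact ih k b (a + b) n (by omega) (by omega) (by omega) (by push_cast at hfuel ⊢; omega)

-- Membership in B's collected fib set = A's fib scan, at the SAME fuel, for n ≤ bound.
theorem mem_pvFibSetAux (F : Nat) : ∀ (a b n bound : Int) (s : PySem.Set Int),
    0 ≤ a → a ≤ b → n ≤ bound →
    (n ∈ pvFibSetAux a b bound F s ↔ (n ∈ s ∨ pvIsFibAux a b n F = true)) := by
  induction F with
  | zero => intro a b n bound s _ _ _; simp [pvFibSetAux, pvIsFibAux]
  | succ f ih =>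
    intro a b n bound s ha hab hnb
    by_cases hcoll : a ≤ bound
    · simp only [pvFibSetAux, if_pos hcoll]
      rw [ih b (a + b) n bound _ (by omega) (by omega) hnb]
      rw [PySem.Set.mem_add]
      by_cases hle : a ≤ n
      · by_cases he : a = n
        · simp [pvIsFibAux, he]
        · have hne : ¬ (a == n) = true := by simp [he]
          simp only [pvIsFibAux, if_pos hle, if_neg hne]
          constructor
          · rintro (⟨h | h⟩ | h)
            · exact Or.inl h
            · exact absurd h.symm he
            · exact Or.inr h
          · rintro (h | h)
            · exact Or.inl (Or.inl h)
            · exact Or.inr h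
      · have hfib : pvIsFibAux b (a + b) n f = false :=
          pvIsFibAux_false_of_lt f b (a + b) n (by omega)
        simp only [pvIsFibAux, if_neg hle, hfib]
        constructor
        · rintro (⟨h | h⟩ | h)
          · exact Or.inl h
          · omega
          · simp at h
        · rintro (h | h)
          · exact Or.inl (Or.inl h)
          · simp at h
    · have hna : n < a := by omega
      simp only [pvFibSetAux, if_neg hcoll]
      rw [pvIsFibAux_false_of_lt _ _ _ _ hna]
      simp
-- For 0 < num ≤ bound, A's fib scan (its own fuel) = membership in B's collected set.
theorem fib_scan_eq_set (num bound : Int) (hpos : 0 < num) (hle : num ≤ bound) :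
    pvIsFibAux 0 1 num (2 * num.toNat + 2) =
      PySem.Set.contains (pvFibSetAux 0 1 bound (2 * bound.toNat + 2) PySem.Set.empty) num := by
  have hstab : pvIsFibAux 0 1 num (2 * bound.toNat + 2) = pvIsFibAux 0 1 num (2 * num.toNat + 2) := by
    have h := pvIsFibAux_fuel_stable (2 * num.toNat + 1) (2 * bound.toNat - 2 * num.toNat)
      0 1 num (by omega) (by omega) (by omega) (by omega)
    have e1 : 2 * num.toNat + 1 + 1 + (2 * bound.toNat - 2 * num.toNat) = 2 * bound.toNat + 2 := by
      omega
    have e2 : 2 * num.toNat + 1 + 1 = 2 * num.toNat + 2 := by omega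
    rw [e1, e2] at h
    exact h
  have hmem := mem_pvFibSetAux (2 * bound.toNat + 2) 0 1 num bound PySem.Set.empty
    (by omega) (by omega) hle
  have hiff : (PySem.Set.contains (pvFibSetAux 0 1 bound (2 * bound.toNat + 2) PySem.Set.empty) num = true)
      ↔ (pvIsFibAux 0 1 num (2 * num.toNat + 2) = true) := by
    rw [PySem.Set.contains_iff, hmem, hstab]
    simp [PySem.Set.empty]
  exact Bool.eq_iff_iff.mpr hiff.symm

-- Every list element is bounded by max(numbers, default=0) = maxD.
theorem le_maxD (numbers : List Int) (num : Int) (hmem : num ∈ numbers) :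
    num ≤ PySem.List.maxD numbers (fun x => x) 0 := by
  have hne : numbers ≠ [] := by intro h; subst h; simp at hmem
  obtain ⟨m, hm⟩ : ∃ m, PySem.List.max? numbers (fun x => x) = some m := by
    cases h : PySem.List.max? numbers (fun x => x) with
    | none => exact absurd ((PySem.List.max?_eq_none_iff numbers _).mp h) hne
    | some m => exact ⟨m, rfl⟩
  have := PySem.List.max?_isMax hm num hmem
  simpa [PySem.List.maxD, hm] using this

-- ===== VERDICT (by name: the statement is the Claim_ definition above) =====
theorem sum_prime_fibonacci_spec : Claim_equal_sum_prime_fibonacci := by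
  intro numbers _
  unfold Spec_sum_prime_fibonacci sum_prime_fibonacci sum_prime_fibonacci_alt
  apply PySem.List.foldl_congr_mem
  intro acc num hmem
  by_cases hpos : 0 < num
  · rw [fib_scan_eq_set num _ hpos (le_maxD numbers num hmem)]
  · have h1 : ¬ (num > 0) := by omega
    simp [h1]
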